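-- pv_equiv track=rewrite | github.com/AI4CTS/E2Usd | E2USD/utils.py | find_cut_points_from_label
-- ===== SOURCE A (Python) =====
-- def find_cut_points_from_label(label):
--     pre = 0
--     current = 0
--     length = len(list(label))
--     result = []
--     while current < length:
--         if label[current] == label[pre]:
--             current += 1
--             continue
--         else:
--             result.append(current)
--             pre = current
--     return result
-- ===== SOURCE B (Python) =====
-- def find_cut_points_from_label(label):
--     # Collapse the sequence into maximal runs of equal values, then return
--     # the running cumulative sums of the run lengths, dropping the final total.
--     seq = list(label)
--     lens = []
--     i = 0
--     n = len(seq)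
--     while i < n:
--         j = i + 1
--         while j < n and seq[j] == seq[i]:
--             j += 1
--         lens.append(j - i)
--         i = j
--     cuts = []
--     acc = 0
--     for m in lens[:-1]:
--         acc += m
--         cuts.append(acc)
--     return cuts
-- ===== Notes on version B (the rewrite author's own statement) =====
-- stated objective: alternative
-- what changed: B collapses the label sequence into maximal runs, then emits the cumulative sums of the run lengths (dropping the final total), instead of A's single index-walking loop that compares each element against the current run's start index.
import Mathlib
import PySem

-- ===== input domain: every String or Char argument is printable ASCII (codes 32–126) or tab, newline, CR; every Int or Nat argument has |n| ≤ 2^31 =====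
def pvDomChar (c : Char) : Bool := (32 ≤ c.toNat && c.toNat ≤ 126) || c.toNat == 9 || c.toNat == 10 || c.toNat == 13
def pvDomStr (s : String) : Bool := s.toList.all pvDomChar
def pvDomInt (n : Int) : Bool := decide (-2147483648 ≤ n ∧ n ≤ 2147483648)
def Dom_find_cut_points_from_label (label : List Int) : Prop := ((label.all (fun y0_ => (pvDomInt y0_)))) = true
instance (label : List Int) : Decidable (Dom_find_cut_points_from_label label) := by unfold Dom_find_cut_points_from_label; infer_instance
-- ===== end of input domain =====

-- B replaces A's index-walking loop by a run-length decomposition: collapse the list into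
-- maximal runs, then emit cumulative sums of the run lengths, dropping the final total
-- (objective: alternative decomposition of the same O(n) task).

-- ===== PORT A =====
-- while loop of A: state (pre, current, result); label[.] via pyGet? (indices stay in range).
def pvLoopA (label : List Int) (len : Int) (pre current : Int) (result : List Int) : List Int :=
  if _h : current < len then
    if heq : PySem.List.pyGet? label current = PySem.List.pyGet? label pre then
      pvLoopA label len pre (current + 1) result
    else
      pvLoopA label len current current (result ++ [current])
  else
    result
termination_by ((len - current).toNat, if pre = current then 0 else 1)
decreasing_by
  · apply Prod.Lex.left; omega
  · have hne : pre ≠ current := by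
      intro hc; exact heq (by rw [hc])
    have : (len - current).toNat = (len - current).toNat := rfl
    simp [hne]
    exact Prod.Lex.right _ (by omega)

def find_cut_points_from_label (label : List Int) : List Int :=
  pvLoopA label ((label.length : Int)) 0 0 []

-- ===== PORT B =====
-- inner while of Source B: the length of each maximal run; recursion chomps one run per step.
def pvRunLengths : List Int → List Int
  | [] => []
  | x :: xs =>
    let t := xs.takeWhile (fun y => y = x)
    ((1 : Int) + t.length) :: pvRunLengths (xs.drop t.length)
termination_by l => l.length
decreasing_by
  simp only [List.length_drop, List.length_cons]
  omega

def find_cut_points_from_label_alt (label : List Int) : List Int :=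
  let lens := pvRunLengths label
  (lens.dropLast.foldl (fun (p : Int × List Int) m => (p.1 + m, p.2 ++ [p.1 + m]))
    ((0 : Int), ([] : List Int))).2

-- ===== PRECONDITION & SPEC =====
def Spec_find_cut_points_from_label (label : List Int) (out : List Int) : Prop := out = find_cut_points_from_label_alt label
instance (label : List Int) (out : List Int) : Decidable (Spec_find_cut_points_from_label label out) := by unfold Spec_find_cut_points_from_label; infer_instance

-- ===== CLAIM (what is proved, stated in full; the proofs are below) =====
def Claim_equal_find_cut_points_from_label : Prop := ∀ (label : List Int), Dom_find_cut_points_from_label label → Spec_find_cut_points_from_label label (find_cut_points_from_label label)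

-- ===== LEMMAS AND PROOFS =====

-- reference function used only in the proofs: cut indices of l, given the current run value v
-- and the absolute index c of l's head.
def pvAux (v : Int) (c : Int) : List Int → List Int
  | [] => []
  | x :: xs => if x = v then pvAux v (c + 1) xs else c :: pvAux x (c + 1) xs

-- partial sums starting from a
def pvPsum (a : Int) : List Int → List Int
  | [] => []
  | n :: ns => (a + n) :: pvPsum (a + n) ns

theorem pvFoldl_psum (lens : List Int) (a : Int) (res : List Int) :
    (lens.foldl (fun (p : Int × List Int) m => (p.1 + m, p.2 ++ [p.1 + m])) (a, res)).2
      = res ++ pvPsum a lens := by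
  induction lens generalizing a res with
  | nil => simp [pvPsum]
  | cons n ns ih => simp [List.foldl, pvPsum, ih]

theorem pvDropWhile_eq_drop_takeWhile {α : Type} (p : α → Bool) (l : List α) :
    l.dropWhile p = l.drop (l.takeWhile p).length := by
  induction l with
  | nil => rfl
  | cons x xs ih =>
    by_cases h : p x <;> simp [List.dropWhile, List.takeWhile, h, ih]

theorem pvAux_run_nil (v c : Int) (l : List Int)
    (h : l.dropWhile (fun y => y = v) = []) : pvAux v c l = [] := by
  induction l generalizing c with
  | nil => rfl
  | cons x xs ih =>
    by_cases hx : x = v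
    · simp only [List.dropWhile, hx, decide_true] at h
      simp [pvAux, hx, ih _ h]
    · simp [List.dropWhile, hx] at h

theorem pvAux_run_cons (v c : Int) (l : List Int) (z : Int) (zs : List Int)
    (h : l.dropWhile (fun y => y = v) = z :: zs) :
    pvAux v c l = (c + ((l.takeWhile (fun y => y = v)).length : Int)) ::
      pvAux z (c + ((l.takeWhile (fun y => y = v)).length : Int) + 1) zs := by
  induction l generalizing c with
  | nil => simp [List.dropWhile] at h
  | cons x xs ih =>
    by_cases hx : x = v
    · simp only [List.dropWhile, hx, decide_true] at h
      simp only [pvAux, hx, List.takeWhile, decide_true, List.length_cons]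
      rw [ih _ h]
      push_cast
      rw [show c + 1 + ((xs.takeWhile (fun y => y = v)).length : Int)
            = c + (((xs.takeWhile (fun y => y = v)).length : Int) + 1) from by ring]
    · simp only [List.dropWhile, hx, decide_false] at h
      obtain ⟨rfl, rfl⟩ : x = z ∧ xs = zs := by
        injection h with h1 h2; exact ⟨h1, h2⟩
      simp [pvAux, List.takeWhile, hx]

theorem pvRunLengths_cons_ne_nil (z : Int) (zs : List Int) : pvRunLengths (z :: zs) ≠ [] := by
  rw [pvRunLengths]; simp

theorem pvAux_eq_psum (y : Int) (ys : List Int) (c : Int) :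
    pvAux y (c + 1) ys = pvPsum c (pvRunLengths (y :: ys)).dropLast := by
  induction hn : ys.length using Nat.strong_induction_on generalizing y ys c with
  | _ n ih =>
  subst hn
  rw [pvRunLengths]
  cases hr : ys.drop (ys.takeWhile (fun y' => y' = y)).length with
  | nil =>
    rw [pvAux_run_nil y (c + 1) ys ((pvDropWhile_eq_drop_takeWhile _ ys).trans hr)]
    simp [pvRunLengths, pvPsum]
  | cons z zs =>
    rw [pvAux_run_cons y (c + 1) ys z zs ((pvDropWhile_eq_drop_takeWhile _ ys).trans hr)]
    have hlen : zs.length < ys.length := by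
      have h1 := congrArg List.length hr
      have h2 := (List.takeWhile_sublist (l := ys) (fun y' => y' = y)).length_le
      simp only [List.length_drop, List.length_cons] at h1
      omega
    rw [List.dropLast_cons_of_ne_nil (pvRunLengths_cons_ne_nil z zs), pvPsum]
    rw [show c + (1 + ((ys.takeWhile (fun y' => y' = y)).length : Int))
          = c + ((ys.takeWhile (fun y' => y' = y)).length : Int) + 1 from by ring]
    rw [show c + 1 + ((ys.takeWhile (fun y' => y' = y)).length : Int) + 1
          = (c + ((ys.takeWhile (fun y' => y' = y)).length : Int) + 1) + 1 from by ring]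
    rw [ih zs.length hlen z zs (c + ((ys.takeWhile (fun y' => y' = y)).length : Int) + 1) rfl]
    rw [show c + 1 + ((ys.takeWhile (fun y' => y' = y)).length : Int)
          = c + ((ys.takeWhile (fun y' => y' = y)).length : Int) + 1 from by ring]

-- A's loop computes pvAux over the remaining suffix.
theorem pvLoopA_eq_aux (label : List Int) (v : Int) :
    ∀ (ls : List Int) (pre current : Int) (result : List Int),
      0 ≤ pre → pre ≤ current →
      current = ((label.length - ls.length : Nat) : Int) →
      ls.length ≤ label.length →
      label.drop (label.length - ls.length) = ls →
      PySem.List.pyGet? label pre = some v →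
      pvLoopA label ((label.length : Int)) pre current result = result ++ pvAux v current ls := by
  intro ls
  induction ls generalizing v with
  | nil =>
    intro pre current result _ _ hcur _ _ _
    simp only [List.length_nil, Nat.sub_zero] at hcur
    rw [pvLoopA, dif_neg (by omega)]
    simp [pvAux]
  | cons x xs ih =>
    intro pre current result hpre0 hpc hcur hlen hdrop hv
    simp only [List.length_cons] at hcur hlen
    have hlt : current < ((label.length : Int)) := by omega
    have hgetc : PySem.List.pyGet? label current = some x := by
      have hx : label[label.length - (x :: xs).length]? = some x := by
        have := congrArg (fun l => l.head?) hdrop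
        simpa [List.head?_drop] using this
      rw [hcur, PySem.List.pyGet?_natCast]
      simpa using hx
    rw [pvLoopA]
    rw [dif_pos hlt, hgetc, hv]
    have hstep : label.drop (label.length - xs.length) = xs := by
      have h1 : label.length - xs.length = (label.length - (x :: xs).length) + 1 := by
        simp only [List.length_cons]; omega
      rw [h1, ← List.drop_drop, hdrop]; rfl
    by_cases hxv : x = v
    · rw [dif_pos (by rw [hxv])]
      rw [ih v pre (current + 1) result hpre0 (by omega)
        (by push_cast; omega) (by omega) hstep hv]
      simp [pvAux, hxv]
    · rw [dif_neg (by simpa using hxv)]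
      rw [pvLoopA]
      rw [dif_pos hlt, dif_pos rfl]
      rw [ih x current (current + 1) (result ++ [current]) (by omega) (by omega)
        (by push_cast; omega) (by omega) hstep hgetc]
      simp [pvAux, hxv]

-- ===== VERDICT (by name: the statement is the Claim_ definition above) =====
theorem find_cut_points_from_label_spec : Claim_equal_find_cut_points_from_label := by
  intro label _
  unfold Spec_find_cut_points_from_label find_cut_points_from_label find_cut_points_from_label_alt
  cases label with
  | nil =>
    rw [pvLoopA]; simp [pvRunLengths]
  | cons x xs =>
    have hget0 : PySem.List.pyGet? (x :: xs) 0 = some x := by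
      simp [PySem.List.pyGet?, PySem.List.pyIdx?]
    rw [pvLoopA_eq_aux (x :: xs) x (x :: xs) 0 0 [] le_rfl le_rfl
      (by simp) le_rfl (by simp) hget0]
    have : pvAux x 0 (x :: xs) = pvAux x (0 + 1) xs := by
      simp [pvAux]
    rw [List.nil_append, this, pvAux_eq_psum x xs 0]
    rw [pvFoldl_psum]
    simp
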